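-- pv_equiv track=rewrite | github.com/SpaceManiac/sublime-dm-langclient | reference_browser.py | pre
-- ===== SOURCE A (Python) =====
-- def pre(body):
--     output = ''
--     last_pos = 0
--     while True:
--         start = body.find('<pre>', last_pos)
--         if start < 0:
--             output += body[last_pos:]
--             break
--         output += body[last_pos:start]
--         end = body.find('</pre>', start)
--         if end < 0:
--             break
--         output += body[start + len('<pre>'):end].replace("\n", "<br>")
--         last_pos = end + len('</pre>')
--     return output
-- ===== SOURCE B (Python) =====
-- def pre(body):
--     # Split on the closing tag once; each non-final piece ended at a '</pre>'.
--     parts = body.split('</pre>')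
--     out = []
--     for part in parts[:-1]:
--         i = part.find('<pre>')
--         if i < 0:
--             # this '</pre>' had no opener: keep the text and the tag verbatim
--             out.append(part)
--             out.append('</pre>')
--         else:
--             out.append(part[:i])
--             out.append(part[i + len('<pre>'):].replace('\n', '<br>'))
--     last = parts[-1]
--     j = last.find('<pre>')
--     out.append(last if j < 0 else last[:j])
--     return ''.join(out)
-- ===== Notes on version B (the rewrite author's own statement) =====
-- stated objective: alternative
-- what changed: A's moving-index while-loop (repeated body.find from a cursor with string accumulation) is replaced by splitting the body on '</pre>' once and making a single pass over the resulting pieces, inspecting each piece for '<pre>'.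
import Mathlib
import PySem

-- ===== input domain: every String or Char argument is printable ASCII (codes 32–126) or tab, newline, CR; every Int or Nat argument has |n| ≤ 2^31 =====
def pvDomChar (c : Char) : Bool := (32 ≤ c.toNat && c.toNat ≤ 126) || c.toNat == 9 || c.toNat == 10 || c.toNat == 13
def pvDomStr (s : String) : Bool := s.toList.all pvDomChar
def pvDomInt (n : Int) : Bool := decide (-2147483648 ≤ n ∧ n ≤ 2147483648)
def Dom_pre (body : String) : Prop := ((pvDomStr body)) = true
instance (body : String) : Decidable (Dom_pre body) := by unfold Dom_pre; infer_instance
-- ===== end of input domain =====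

-- B replaces A's moving-index while-loop (find '<pre>' / find '</pre>' from a cursor, accumulating
-- output) by one split of the body on '</pre>' followed by a single pass over the pieces: an
-- alternative decomposition of the same job (equal return values are proved below; no speed claim).


-- ===== PORT A =====
-- A scans with body.find('<pre>', last_pos) / body.find('</pre>', start), accumulating `output`
-- and advancing `last_pos`; the two lemmas below only justify the loop's termination.

def patP : List Char := ['<', 'p', 'r', 'e', '>']
def patC : List Char := ['<', '/', 'p', 'r', 'e', '>']
def nl : List Char := ['\n']
def br : List Char := ['<', 'b', 'r', '>']

-- start index past the end (or no occurrence) ⇒ findFrom ≥ 0 forces start ≤ length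
lemma findFrom_nonneg_le_length (s sub : List Char) (k : Nat)
    (h : ¬ PySem.Chars.findFrom s sub (k : Int) none < 0) : k ≤ s.length := by
  by_contra hk
  simp [PySem.Chars.findFrom] at h
  omega

lemma findFrom_nonneg_ge_start (s sub : List Char) (k : Nat) (hk : k ≤ s.length)
    (h : ¬ PySem.Chars.findFrom s sub (k : Int) none < 0) :
    k ≤ (PySem.Chars.findFrom s sub (k : Int) none).toNat := by
  have hne : PySem.Chars.findFrom s sub (k : Int) none ≠ -1 := by
    intro he; rw [he] at h; omega
  have := (PySem.Chars.findFrom_natCast_spec s sub k hk hne).1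
  omega

def preCore (body : List Char) (output : List Char) (lastPos : Nat) : List Char :=
  let start := PySem.Chars.findFrom body patP (lastPos : Int) none
  if h1 : start < 0 then output ++ PySem.List.slice body (some (lastPos : Int)) none
  else
    let out2 := output ++ PySem.List.slice body (some (lastPos : Int)) (some start)
    let e := PySem.Chars.findFrom body patC start none
    if h2 : e < 0 then out2
    else
      preCore body
        (out2 ++ PySem.Chars.replace (PySem.List.slice body (some (start + 5)) (some e)) nl br)
        (e.toNat + 6)
termination_by body.length + 1 - lastPos
decreasing_by
  simp only [start, e] at h1 h2 ⊢
  have hlen := findFrom_nonneg_le_length body patP lastPos h1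
  have hge := findFrom_nonneg_ge_start body patP lastPos hlen h1
  rw [show PySem.Chars.findFrom body patP (lastPos : Int) none
        = (((PySem.Chars.findFrom body patP (lastPos : Int) none).toNat : Nat) : Int) by omega] at h2 ⊢
  have hlen2 := findFrom_nonneg_le_length body patC _ h2
  have hge2 := findFrom_nonneg_ge_start body patC _ hlen2 h2
  omega

def pre (body : String) : String := String.ofList (preCore body.toList [] 0)


-- ===== PORT B =====
-- B: parts = body.split('</pre>'); one pass over the pieces (loop over parts[:-1], then parts[-1]).
def altGo : List (List Char) → List Char
  | [] => []
  | [last] =>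
      let j := PySem.Chars.find last patP
      if j < 0 then last else PySem.List.slice last none (some j)
  | part :: rest =>
      let i := PySem.Chars.find part patP
      (if i < 0 then part ++ patC
       else PySem.List.slice part none (some i) ++
            PySem.Chars.replace (PySem.List.slice part (some (i + 5)) none) nl br) ++ altGo rest

def pre_alt (body : String) : String := String.ofList (altGo (PySem.Chars.splitOn body.toList patC))

-- ===== PRECONDITION & SPEC =====
-- (A is total: no Pre_ needed)
def Spec_pre (body : String) (out : String) : Prop := out = pre_alt body
instance (body : String) (out : String) : Decidable (Spec_pre body out) := by unfold Spec_pre; infer_instance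

-- ===== CLAIM (what is proved, stated in full; the proofs are below) =====
def Claim_equal_pre : Prop := ∀ (body : String), Dom_pre body → Spec_pre body (pre body)

-- ===== LEMMAS AND PROOFS =====

-- (we phrase everything with "pat <+: t.drop q")

lemma occ_infix {pat t : List Char} {q : Nat} (h : pat <+: t.drop q) : pat <:+: t := by
  obtain ⟨r, hr⟩ := h
  exact ⟨t.take q, r, by conv_rhs => rw [← List.take_append_drop q t, ← hr, ← List.append_assoc]⟩

lemma infix_occ {pat t : List Char} (h : pat <:+: t) : ∃ q, pat <+: t.drop q := by
  obtain ⟨u, v, huv⟩ := h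
  exact ⟨u.length, by rw [← huv]; simp⟩

lemma find_eval {t sub : List Char} {m : Nat} (hocc : sub <+: t.drop m)
    (hmin : ∀ j < m, ¬ sub <+: t.drop j) : PySem.Chars.find t sub = (m : Int) := by
  have hne : PySem.Chars.find t sub ≠ -1 :=
    (PySem.Chars.find_ne_neg_one_iff t sub).mpr (occ_infix hocc)
  have hge : 0 ≤ PySem.Chars.find t sub := by
    have := PySem.Chars.neg_one_le_find t sub; omega
  obtain ⟨h1, h2⟩ := PySem.Chars.find_spec hge
  rcases Nat.lt_trichotomy (PySem.Chars.find t sub).toNat m with h | h | h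
  · exact absurd h1 (hmin _ h)
  · omega
  · exact absurd hocc (h2 _ h)

lemma find_none {t sub : List Char} (hno : ∀ j, ¬ sub <+: t.drop j) :
    PySem.Chars.find t sub = -1 := by
  rw [PySem.Chars.find_eq_neg_one_iff]
  intro hinf
  obtain ⟨q, hq⟩ := infix_occ hinf
  exact hno q hq

lemma findFrom_eval {t sub : List Char} {k m : Nat} (hm : m ≤ t.length) (hkm : k ≤ m)
    (hocc : sub <+: t.drop m) (hmin : ∀ j, k ≤ j → j < m → ¬ sub <+: t.drop j) :
    PySem.Chars.findFrom t sub (k : Int) none = (m : Int) := by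
  rw [PySem.Chars.findFrom_natCast t sub k (le_trans hkm hm)]
  have h1 : PySem.Chars.find (t.drop k) sub = ((m - k : Nat) : Int) := by
    apply find_eval
    · rw [List.drop_drop, show k + (m - k) = m by omega]; exact hocc
    · intro j hj hpre
      rw [List.drop_drop] at hpre
      exact hmin (k + j) (by omega) (by omega) hpre
  rw [h1]
  have : ((m - k : Nat) : Int) ≠ -1 := by omega
  simp only [this, if_false]
  omega

lemma findFrom_none {t sub : List Char} {k : Nat} (hk : k ≤ t.length)
    (hno : ∀ j, k ≤ j → ¬ sub <+: t.drop j) :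
    PySem.Chars.findFrom t sub (k : Int) none = -1 := by
  rw [PySem.Chars.findFrom_natCast_eq_neg_one_iff t sub k hk]
  intro hinf
  obtain ⟨q, hq⟩ := infix_occ hinf
  rw [List.drop_drop] at hq
  exact hno (k + q) (by omega) hq
lemma occ_get {pat t : List Char} {q m : Nat} (h : pat <+: t.drop q) (hm : m < pat.length) :
    t[q + m]? = pat[m]? := by
  obtain ⟨r, hr⟩ := h
  rw [← List.getElem?_drop, ← hr, List.getElem?_append_left hm]

-- a '<pre>' occurrence at q and a '</pre>' occurrence at e cannot overlap:
-- if q < e + 6 then the whole '<pre>' lies before e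
lemma overlap {t : List Char} {q e : Nat} (hP : patP <+: t.drop q) (hC : patC <+: t.drop e)
    (hlt : q < e + 6) : q + 5 ≤ e := by
  by_contra hgt
  rcases Nat.lt_trichotomy q e with h | h | h
  · -- q < e < q + 5 : position e carries patP[e-q] (1..4) and patC[0] = '<'
    have h1 : t[e]? = patP[e - q]? := by
      have := occ_get hP (show e - q < patP.length by simp [patP]; omega)
      rwa [show q + (e - q) = e by omega] at this
    have h2 : t[e]? = patC[0]? := by
      have := occ_get hC (show 0 < patC.length by simp [patC])
      rwa [Nat.add_zero] at this
    rw [h2] at h1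
    have hd : e - q = 1 ∨ e - q = 2 ∨ e - q = 3 ∨ e - q = 4 := by omega
    rcases hd with h' | h' | h' | h' <;> rw [h'] at h1 <;> simp [patP, patC] at h1
  · -- q = e : position q+1 carries patP[1]='p' and patC[1]='/'
    have h1 : t[q + 1]? = patP[1]? := occ_get hP (by simp [patP])
    have h2 : t[q + 1]? = patC[1]? := by
      have := occ_get hC (show 1 < patC.length by simp [patC]); rwa [← h] at this
    rw [h2] at h1; simp [patP, patC] at h1
  · -- e < q < e + 6 : position q carries patP[0]='<' and patC[q-e] (1..5)
    have h1 : t[q]? = patP[0]? := by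
      have := occ_get hP (show 0 < patP.length by simp [patP]); rwa [Nat.add_zero] at this
    have h2 : t[q]? = patC[q - e]? := by
      have := occ_get hC (show q - e < patC.length by simp [patC]; omega)
      rwa [show e + (q - e) = q by omega] at this
    rw [h2] at h1
    have hd : q - e = 1 ∨ q - e = 2 ∨ q - e = 3 ∨ q - e = 4 ∨ q - e = 5 := by omega
    rcases hd with h' | h' | h' | h' | h' <;> rw [h'] at h1 <;> simp [patP, patC] at h1

lemma occ_take {pat t : List Char} {q k : Nat} (h : pat <+: t.drop q) (hk : q + pat.length ≤ k) :
    pat <+: (t.take k).drop q := by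
  rw [List.drop_take]
  rw [List.prefix_take_iff]
  exact ⟨h, by omega⟩

lemma occ_of_take {pat t : List Char} {q k : Nat} (h : pat <+: (t.take k).drop q) :
    pat <+: t.drop q := by
  rw [List.drop_take] at h
  exact h.trans (List.take_prefix _ _)
lemma findGo_shift (sub : List Char) : ∀ (l : List Char) (k : Nat),
    PySem.Chars.find.go sub l k =
      if PySem.Chars.find l sub = -1 then -1 else (k : Int) + PySem.Chars.find l sub := by
  intro l
  induction l with
  | nil =>
      intro k
      simp [PySem.Chars.find.go, PySem.Chars.find]
      split_ifs <;> simp_all <;> omega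
  | cons c t ih =>
      intro k
      have e1 : PySem.Chars.find.go sub (c :: t) k =
          if sub.isPrefixOf (c :: t) then (k : Int) else PySem.Chars.find.go sub t (k + 1) := by
        rw [PySem.Chars.find.go]
      have e0 : PySem.Chars.find (c :: t) sub =
          if sub.isPrefixOf (c :: t) then (0 : Int) else PySem.Chars.find.go sub t 1 := by
        rw [show PySem.Chars.find (c :: t) sub = PySem.Chars.find.go sub (c :: t) 0 from rfl,
            PySem.Chars.find.go]
        norm_num
      have hb := PySem.Chars.neg_one_le_find t sub
      rw [e1, e0, ih (k + 1), ih 1]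
      split_ifs <;> simp_all <;> omega

lemma find_cons (c : Char) (t sub : List Char) :
    PySem.Chars.find (c :: t) sub =
      if sub.isPrefixOf (c :: t) then 0
      else if PySem.Chars.find t sub = -1 then -1 else 1 + PySem.Chars.find t sub := by
  rw [show PySem.Chars.find (c :: t) sub = PySem.Chars.find.go sub (c :: t) 0 from rfl,
      PySem.Chars.find.go]
  by_cases hp : sub.isPrefixOf (c :: t)
  · simp [hp]
  · simp only [hp, if_false]
    rw [findGo_shift]
    have hb := PySem.Chars.neg_one_le_find t sub
    split_ifs <;> simp_all <;> omega

-- pure recursive description of body.split('</pre>')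
def sop (t : List Char) : List (List Char) :=
  if h : PySem.Chars.find t patC < 0 then [t]
  else t.take (PySem.Chars.find t patC).toNat ::
       sop (t.drop ((PySem.Chars.find t patC).toNat + 6))
termination_by t.length
decreasing_by
  have hge : 0 ≤ PySem.Chars.find t patC := by omega
  have := (PySem.Chars.find_spec hge).1
  have hlen := this.length_le
  simp only [List.length_drop, patC] at *
  simp at hlen
  omega

lemma sop_ne_nil (t : List Char) : sop t ≠ [] := by
  rw [sop]
  split <;> simp

def prep (c : List Char) : List (List Char) → List (List Char)
  | [] => [c]
  | x :: xs => (c ++ x) :: xs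

lemma sop_nil : sop ([] : List Char) = [[]] := by
  rw [sop]
  have h : PySem.Chars.find ([] : List Char) patC = -1 :=
    find_none (fun j h => by simp [patC] at h)
  simp [h]

lemma splitGo_nil (fuel : Nat) (cur : List Char) (acc : List (List Char)) :
    PySem.Chars.splitOn.go patC fuel [] cur acc = acc.reverse ++ [cur.reverse] := by
  cases fuel <;> simp [PySem.Chars.splitOn.go]

lemma splitGo_eq_sop : ∀ (n : Nat) (l : List Char), l.length ≤ n → ∀ (fuel : Nat),
    l.length ≤ fuel → ∀ (cur : List Char) (acc : List (List Char)),
    PySem.Chars.splitOn.go patC fuel l cur acc = acc.reverse ++ prep cur.reverse (sop l) := by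
  intro n
  induction n with
  | zero =>
      intro l hl fuel hf cur acc
      have hnil : l = [] := by cases l <;> simp_all
      subst hnil
      rw [splitGo_nil, sop_nil]
      simp [prep]
  | succ n ih =>
      intro l hl fuel hf cur acc
      match l, fuel with
      | [], fuel =>
          rw [splitGo_nil, sop_nil]
          simp [prep]
      | c :: rest, 0 => simp at hf
      | c :: rest, fuel + 1 =>
          rw [PySem.Chars.splitOn.go]
          have hlen6 : patC.length = 6 := by decide
          by_cases hp : patC.isPrefixOf (c :: rest)
          · simp only [hp, if_true, hlen6]
            have hocc : patC <+: (c :: rest) := List.isPrefixOf_iff_prefix.mp hp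
            have hfind : PySem.Chars.find (c :: rest) patC = 0 := by
              have := find_eval (t := c :: rest) (m := 0) (by simpa using hocc) (by omega)
              simpa using this
            have hl' : ((c :: rest).drop 6).length ≤ n := by
              simp only [List.length_drop, List.length_cons] at hl ⊢; omega
            have hf' : ((c :: rest).drop 6).length ≤ fuel := by
              simp only [List.length_drop, List.length_cons] at hf ⊢; omega
            rw [ih _ hl' fuel hf']
            have hsopl : sop (c :: rest) = [] :: sop ((c :: rest).drop 6) := by
              rw [sop, hfind]
              norm_num
            rw [hsopl]
            rcases hrec : sop ((c :: rest).drop 6) with _ | ⟨y, ys⟩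
            · exact absurd hrec (sop_ne_nil _)
            · simp [prep]
          · simp only [hp, if_false]
            have hl' : rest.length ≤ n := by
              simp only [List.length_cons] at hl; omega
            have hf' : rest.length ≤ fuel := by
              simp only [List.length_cons] at hf; omega
            rw [ih rest hl' fuel hf']
            have hb := PySem.Chars.neg_one_le_find rest patC
            rcases hcase : PySem.Chars.find rest patC with g | g
            · rw [Int.ofNat_eq_natCast] at hcase
              have hne : ((g : Int)) ≠ -1 := by omega
              have hfind : PySem.Chars.find (c :: rest) patC = 1 + ((g : Int)) := by
                rw [find_cons, hcase]
                simp [hp, hne]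
              have ht : (1 + (g : Int)).toNat = g + 1 := by omega
              have hsopl : sop (c :: rest) =
                  (c :: rest).take (g + 1) :: sop ((c :: rest).drop (g + 1 + 6)) := by
                rw [sop, hfind]
                rw [dif_neg (by omega : ¬ (1 + (g : Int) < 0))]
                rw [ht]
              have ht2 : ((g : Int)).toNat = g := rfl
              have hsopr : sop rest = rest.take g :: sop (rest.drop (g + 6)) := by
                rw [sop, hcase]
                rw [dif_neg (by omega : ¬ ((g : Int) < 0))]
                rw [ht2]
              rw [hsopl, hsopr]
              rw [show g + 1 + 6 = (g + 6) + 1 by omega]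
              simp [prep, List.take_succ_cons, List.drop_succ_cons]
            · have hg1 : (Int.negSucc g) = -1 := by omega
              rw [hg1] at hcase
              have hfind : PySem.Chars.find (c :: rest) patC = -1 := by
                rw [find_cons, hcase]
                simp [hp]
              have hsopl : sop (c :: rest) = [c :: rest] := by
                rw [sop, hfind]; norm_num
              have hsopr : sop rest = [rest] := by
                rw [sop, hcase]; norm_num
              rw [hsopl, hsopr]
              simp [prep]

lemma splitOn_eq_sop (t : List Char) : PySem.Chars.splitOn t patC = sop t := by
  rw [show PySem.Chars.splitOn t patC = PySem.Chars.splitOn.go patC (t.length + 1) t [] [] from rfl]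
  rw [splitGo_eq_sop t.length t le_rfl (t.length + 1) (by omega)]
  rcases hrec : sop t with _ | ⟨y, ys⟩
  · exact absurd hrec (sop_ne_nil _)
  · simp [prep]
-- the common recursive description both ports compute
def specRec (t : List Char) : List Char :=
  if hs : PySem.Chars.find t patP < 0 then t
  else
    if he : PySem.Chars.findFrom t patC (PySem.Chars.find t patP) none < 0 then
      t.take (PySem.Chars.find t patP).toNat
    else
      t.take (PySem.Chars.find t patP).toNat ++
      PySem.Chars.replace
        ((t.drop ((PySem.Chars.find t patP).toNat + 5)).take
          ((PySem.Chars.findFrom t patC (PySem.Chars.find t patP) none).toNat -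
            ((PySem.Chars.find t patP).toNat + 5))) nl br ++
      specRec (t.drop ((PySem.Chars.findFrom t patC (PySem.Chars.find t patP) none).toNat + 6))
termination_by t.length
decreasing_by
  have hb := PySem.Chars.neg_one_le_find t patP
  rw [show PySem.Chars.find t patP = (((PySem.Chars.find t patP).toNat : Nat) : Int) by omega] at he ⊢
  have hlen := findFrom_nonneg_le_length t patC _ he
  have hne : PySem.Chars.findFrom t patC (((PySem.Chars.find t patP).toNat : Nat) : Int) none ≠ -1 := by
    omega
  have hoc := (PySem.Chars.findFrom_natCast_spec t patC _ hlen hne).2.1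
  have hll := hoc.length_le
  simp only [List.length_drop, patC, List.length_cons, List.length_nil] at hll ⊢
  omega

lemma findFrom_shift {t sub : List Char} {k m : Nat} (hk : k ≤ m) (hm : m ≤ t.length) :
    PySem.Chars.findFrom (t.drop k) sub ((m - k : Nat) : Int) none
      = if PySem.Chars.findFrom t sub (m : Int) none = -1 then -1
        else PySem.Chars.findFrom t sub (m : Int) none - k := by
  rw [PySem.Chars.findFrom_natCast t sub m hm,
      PySem.Chars.findFrom_natCast (t.drop k) sub (m - k) (by simp [List.length_drop]; omega)]
  rw [List.drop_drop, show k + (m - k) = m by omega]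
  have hb := PySem.Chars.neg_one_le_find (t.drop m) sub
  split_ifs <;> push_cast <;> omega
lemma specRec_none {t : List Char} (h : PySem.Chars.find t patP = -1) : specRec t = t := by
  rw [specRec, dif_pos (by rw [h]; omega)]

lemma specRec_noclose {t : List Char} {m : Nat} (hm : PySem.Chars.find t patP = (m : Int))
    (he : PySem.Chars.findFrom t patC (m : Int) none = -1) :
    specRec t = t.take m := by
  rw [specRec, dif_neg (by rw [hm]; omega)]
  rw [dif_pos (by rw [hm, he]; omega)]
  rw [hm, Int.toNat_natCast]

lemma specRec_step {t : List Char} {m e : Nat} (hm : PySem.Chars.find t patP = (m : Int))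
    (he : PySem.Chars.findFrom t patC (m : Int) none = (e : Int)) :
    specRec t = t.take m ++
      PySem.Chars.replace ((t.drop (m + 5)).take (e - (m + 5))) nl br ++
      specRec (t.drop (e + 6)) := by
  rw [specRec, dif_neg (by rw [hm]; omega)]
  rw [dif_neg (by rw [hm, he]; omega)]
  rw [hm, he, Int.toNat_natCast, Int.toNat_natCast]

lemma occ_m5 {t : List Char} {m : Nat} (hocc : patP <+: t.drop m) : m + 5 ≤ t.length := by
  have h := hocc.length_le
  simp only [List.length_drop, patP, List.length_cons, List.length_nil] at h
  by_cases hm : m ≤ t.length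
  · omega
  · exfalso
    have : t.drop m = [] := List.drop_eq_nil_of_le (by omega)
    rw [this] at hocc
    have := hocc.length_le
    simp [patP] at this

lemma occC_m6 {t : List Char} {m : Nat} (hocc : patC <+: t.drop m) : m + 6 ≤ t.length := by
  have h := hocc.length_le
  simp only [List.length_drop, patC, List.length_cons, List.length_nil] at h
  by_cases hm : m ≤ t.length
  · omega
  · exfalso
    have : t.drop m = [] := List.drop_eq_nil_of_le (by omega)
    rw [this] at hocc
    have := hocc.length_le
    simp [patC] at this

lemma specRec_shift (t : List Char) (k : Nat) (hk : k ≤ t.length)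
    (hq : ∀ q, q < k → ¬ patP <+: t.drop q) :
    specRec t = t.take k ++ specRec (t.drop k) := by
  have hb := PySem.Chars.neg_one_le_find t patP
  by_cases hs : PySem.Chars.find t patP < 0
  · have hs1 : PySem.Chars.find t patP = -1 := by omega
    have hinf := (PySem.Chars.find_eq_neg_one_iff t patP).mp hs1
    have hd : PySem.Chars.find (t.drop k) patP = -1 := by
      apply find_none; intro j hj
      rw [List.drop_drop] at hj
      exact hinf (occ_infix hj)
    rw [specRec_none hs1, specRec_none hd]
    exact (List.take_append_drop k t).symm
  · have hge : 0 ≤ PySem.Chars.find t patP := by omega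
    obtain ⟨hocc, hmin⟩ := PySem.Chars.find_spec hge
    set m := (PySem.Chars.find t patP).toNat with hmdef
    have hPm : PySem.Chars.find t patP = (m : Int) := by omega
    have hkm : k ≤ m := by
      by_contra hc
      exact hq m (by omega) hocc
    have hm5 : m + 5 ≤ t.length := occ_m5 hocc
    have hfd : PySem.Chars.find (t.drop k) patP = ((m - k : Nat) : Int) := by
      apply find_eval
      · rw [List.drop_drop, show k + (m - k) = m by omega]; exact hocc
      · intro j hj hpre
        rw [List.drop_drop] at hpre
        exact hmin (k + j) (by omega) hpre
    have hshift := findFrom_shift (t := t) (sub := patC) (k := k) (m := m) hkm (by omega)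
    by_cases he : PySem.Chars.findFrom t patC (m : Int) none = -1
    · have hd2 : PySem.Chars.findFrom (t.drop k) patC ((m - k : Nat) : Int) none = -1 := by
        rw [hshift, if_pos he]
      rw [specRec_noclose hPm he, specRec_noclose hfd hd2]
      rw [← List.take_add, show k + (m - k) = m by omega]
    · -- the closing tag is found at some e ≥ m
      have hmlen : m ≤ t.length := by omega
      have hEge : (0 : Int) ≤ PySem.Chars.findFrom t patC (m : Int) none := by
        rw [PySem.Chars.findFrom_natCast t patC m hmlen] at he ⊢
        have := PySem.Chars.neg_one_le_find (t.drop m) patC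
        split_ifs at he ⊢ <;> omega
      set e := (PySem.Chars.findFrom t patC (m : Int) none).toNat with hedef
      have hE : PySem.Chars.findFrom t patC (m : Int) none = (e : Int) := by omega
      have hoccC : patC <+: t.drop e := by
        have := (PySem.Chars.findFrom_natCast_spec t patC m hmlen (by omega)).2.1
        rwa [hE, Int.toNat_natCast] at this
      have hme : m ≤ e := by
        have := (PySem.Chars.findFrom_natCast_spec t patC m hmlen (by omega)).1
        omega
      have hm5e : m + 5 ≤ e := overlap hocc hoccC (by omega)
      have he6 : e + 6 ≤ t.length := occC_m6 hoccC
      have hd2 : PySem.Chars.findFrom (t.drop k) patC ((m - k : Nat) : Int) none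
          = ((e - k : Nat) : Int) := by
        rw [hshift, if_neg (by omega), hE]
        push_cast; omega
      rw [specRec_step hPm hE, specRec_step hfd hd2]
      rw [List.drop_drop, List.drop_drop]
      rw [show k + (m - k + 5) = m + 5 by omega,
          show k + (e - k + 6) = e + 6 by omega,
          show (e - k) - ((m - k) + 5) = e - (m + 5) by omega]
      rw [show t.take m = t.take k ++ (t.drop k).take (m - k) by
            rw [← List.take_add, show k + (m - k) = m by omega]]
      simp [List.append_assoc]
lemma preCore_none {body output : List Char} {lastPos : Nat}
    (h : PySem.Chars.findFrom body patP (lastPos : Int) none = -1) :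
    preCore body output lastPos = output ++ body.drop lastPos := by
  rw [preCore]
  simp only [h, PySem.List.slice_from_natCast]
  norm_num
lemma preCore_noclose {body output : List Char} {lastPos s : Nat}
    (h : PySem.Chars.findFrom body patP (lastPos : Int) none = (s : Int))
    (h2 : PySem.Chars.findFrom body patC (s : Int) none = -1) :
    preCore body output lastPos = output ++ (body.drop lastPos).take (s - lastPos) := by
  rw [preCore]
  simp only [h, h2, PySem.List.slice_natCast]
  norm_num

lemma preCore_step {body output : List Char} {lastPos s e : Nat}
    (h : PySem.Chars.findFrom body patP (lastPos : Int) none = (s : Int))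
    (h2 : PySem.Chars.findFrom body patC (s : Int) none = (e : Int)) :
    preCore body output lastPos =
      preCore body
        (output ++ (body.drop lastPos).take (s - lastPos) ++
          PySem.Chars.replace ((body.drop (s + 5)).take (e - (s + 5))) nl br)
        (e + 6) := by
  rw [preCore]
  simp only [h, h2]
  rw [dif_neg (by omega : ¬((s : Int) < 0)), dif_neg (by omega : ¬((e : Int) < 0))]
  rw [show ((s : Int) + 5) = ((s + 5 : Nat) : Int) by push_cast; ring]
  simp only [PySem.List.slice_natCast, Int.toNat_natCast]
lemma preCore_eq : ∀ (n : Nat) (body output : List Char) (lastPos : Nat),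
    body.length - lastPos = n → lastPos ≤ body.length →
    preCore body output lastPos = output ++ specRec (body.drop lastPos) := by
  intro n
  induction n using Nat.strong_induction_on with
  | _ n ih =>
    intro body output lastPos hn hl
    have hnc := PySem.Chars.findFrom_natCast body patP lastPos hl
    have hb := PySem.Chars.neg_one_le_find (body.drop lastPos) patP
    have htlen : (body.drop lastPos).length = body.length - lastPos := by
      simp [List.length_drop]
    by_cases hF : PySem.Chars.find (body.drop lastPos) patP = -1
    · have h : PySem.Chars.findFrom body patP (lastPos : Int) none = -1 := by
        rw [hnc, if_pos hF]
      rw [preCore_none h, specRec_none hF]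
    · have hge : (0:Int) ≤ PySem.Chars.find (body.drop lastPos) patP := by omega
      obtain ⟨hocc, hmin⟩ := PySem.Chars.find_spec hge
      set f := (PySem.Chars.find (body.drop lastPos) patP).toNat with hfdef
      have hPf : PySem.Chars.find (body.drop lastPos) patP = (f : Int) := by omega
      have hf5 : f + 5 ≤ (body.drop lastPos).length := occ_m5 hocc
      have h : PySem.Chars.findFrom body patP (lastPos : Int) none
          = ((lastPos + f : Nat) : Int) := by
        rw [hnc, if_neg hF, hPf]; push_cast; ring
      have hl2 : lastPos + f ≤ body.length := by omega
      have hdd : body.drop (lastPos + f) = (body.drop lastPos).drop f := by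
        rw [List.drop_drop]
      have hnc2 := PySem.Chars.findFrom_natCast body patC (lastPos + f) hl2
      have hncB := PySem.Chars.findFrom_natCast (body.drop lastPos) patC f (by omega)
      have hbG := PySem.Chars.neg_one_le_find ((body.drop lastPos).drop f) patC
      by_cases hG : PySem.Chars.find ((body.drop lastPos).drop f) patC = -1
      · have hA : PySem.Chars.findFrom body patC ((lastPos + f : Nat) : Int) none = -1 := by
          rw [hnc2, hdd, if_pos hG]
        have hB : PySem.Chars.findFrom (body.drop lastPos) patC (f : Int) none = -1 := by
          rw [hncB, List.drop_drop, hdd, if_pos hG]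
        rw [preCore_noclose h hA, specRec_noclose hPf hB]
        rw [show lastPos + f - lastPos = f by omega]
      · set g := (PySem.Chars.find ((body.drop lastPos).drop f) patC).toNat with hgdef
        have hGg : PySem.Chars.find ((body.drop lastPos).drop f) patC = (g : Int) := by omega
        have hA : PySem.Chars.findFrom body patC ((lastPos + f : Nat) : Int) none
            = ((lastPos + f + g : Nat) : Int) := by
          rw [hnc2, hdd, if_neg hG, hGg]; push_cast; ring
        have hB : PySem.Chars.findFrom (body.drop lastPos) patC (f : Int) none
            = ((f + g : Nat) : Int) := by
          rw [hncB, List.drop_drop, hdd, if_neg hG, hGg]; push_cast; ring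
        have hoccC : patC <+: ((body.drop lastPos).drop f).drop g := by
          have hgeG : (0:Int) ≤ PySem.Chars.find ((body.drop lastPos).drop f) patC := by omega
          have := (PySem.Chars.find_spec hgeG).1
          rwa [← hgdef] at this
        rw [List.drop_drop] at hoccC
        have hfg6 : f + g + 6 ≤ (body.drop lastPos).length := by
          have := occC_m6 hoccC
          omega
        rw [preCore_step h hA]
        rw [ih (body.length - (lastPos + f + g + 6)) (by omega) body _ _ rfl (by omega)]
        rw [specRec_step hPf hB]
        rw [show lastPos + f - lastPos = f by omega]
        rw [show lastPos + f + g - (lastPos + f + 5) = f + g - (f + 5) by omega]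
        rw [show (body.drop lastPos).drop (f + g + 6) = body.drop (lastPos + f + g + 6) by
              rw [List.drop_drop]; try congr 1; try omega]
        rw [show (body.drop lastPos).drop (f + 5) = body.drop (lastPos + f + 5) by
              rw [List.drop_drop]; try congr 1; try omega]
        simp [List.append_assoc]
lemma take_e6 {t : List Char} {e0 : Nat} (hocc : patC <+: t.drop e0) (he : e0 + 6 ≤ t.length) :
    t.take (e0 + 6) = t.take e0 ++ patC := by
  obtain ⟨r, hr⟩ := hocc
  rw [List.take_add, ← hr]
  simp [patC]

lemma altGo_sop : ∀ (n : Nat) (t : List Char), t.length ≤ n → altGo (sop t) = specRec t := by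
  intro n
  induction n using Nat.strong_induction_on with
  | _ n ih =>
    intro t hn
    have hbC := PySem.Chars.neg_one_le_find t patC
    have hbP := PySem.Chars.neg_one_le_find t patP
    by_cases hf : PySem.Chars.find t patC < 0
    · -- no '</pre>' anywhere: sop t = [t]
      have hf1 : PySem.Chars.find t patC = -1 := by omega
      have hnoC : ∀ j, ¬ patC <+: t.drop j := by
        intro j hj
        exact ((PySem.Chars.find_eq_neg_one_iff t patC).mp hf1) (occ_infix hj)
      rw [sop, dif_pos hf]
      simp only [altGo]
      by_cases hs : PySem.Chars.find t patP < 0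
      · rw [if_pos hs, specRec_none (by omega)]
      · have hge : (0:Int) ≤ PySem.Chars.find t patP := by omega
        obtain ⟨hocc, hmin⟩ := PySem.Chars.find_spec hge
        set s := (PySem.Chars.find t patP).toNat with hsdef
        have hPs : PySem.Chars.find t patP = (s : Int) := by omega
        have hs5 := occ_m5 hocc
        have hE : PySem.Chars.findFrom t patC (s : Int) none = -1 :=
          findFrom_none (by omega) (fun j _ => hnoC j)
        rw [if_neg hs, specRec_noclose hPs hE, hPs]
        rw [show ((s : Int)) = ((s : Nat) : Int) from rfl, PySem.List.slice_to_natCast]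
    · -- first '</pre>' at e0
      have hgeC : (0:Int) ≤ PySem.Chars.find t patC := by omega
      obtain ⟨hoccC, hminC⟩ := PySem.Chars.find_spec hgeC
      set e0 := (PySem.Chars.find t patC).toNat with he0def
      have hCv : PySem.Chars.find t patC = (e0 : Int) := by omega
      have he06 : e0 + 6 ≤ t.length := occC_m6 hoccC
      have hsop : sop t = t.take e0 :: sop (t.drop (e0 + 6)) := by
        rw [sop, dif_neg hf, hCv, Int.toNat_natCast]
      have hplen : (t.take e0).length = e0 := by
        simp [List.length_take]; omega
      obtain ⟨y, ys, hyys⟩ : ∃ y ys, sop (t.drop (e0 + 6)) = y :: ys := by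
        rcases hrec : sop (t.drop (e0 + 6)) with _ | ⟨y, ys⟩
        · exact absurd hrec (sop_ne_nil _)
        · exact ⟨y, ys, rfl⟩
      have hIH : altGo (sop (t.drop (e0 + 6))) = specRec (t.drop (e0 + 6)) := by
        apply ih (n - 1) (by omega)
        simp only [List.length_drop]
        omega
      rw [hsop, hyys]
      simp only [altGo]
      rw [← hyys, hIH]
      have hbp := PySem.Chars.neg_one_le_find (t.take e0) patP
      by_cases hi : PySem.Chars.find (t.take e0) patP < 0
      · -- no '<pre>' before the closing tag: verbatim chunk
        have hi1 : PySem.Chars.find (t.take e0) patP = -1 := by omega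
        have hnoP : ∀ j, ¬ patP <+: (t.take e0).drop j := by
          intro j hj
          exact ((PySem.Chars.find_eq_neg_one_iff _ patP).mp hi1) (occ_infix hj)
        have hqk : ∀ q, q < e0 + 6 → ¬ patP <+: t.drop q := by
          intro q hq hpre
          have h5 := overlap hpre hoccC (by omega)
          exact hnoP q (occ_take hpre (by simpa [patP] using h5))
        rw [if_pos hi, specRec_shift t (e0 + 6) he06 hqk, take_e6 hoccC he06]
      · -- '<pre>' found at i inside the chunk
        have hgeP : (0:Int) ≤ PySem.Chars.find (t.take e0) patP := by omega
        obtain ⟨hoccP, hminP⟩ := PySem.Chars.find_spec hgeP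
        set i := (PySem.Chars.find (t.take e0) patP).toNat with hidef
        have hPi : PySem.Chars.find (t.take e0) patP = (i : Int) := by omega
        have hi5 : i + 5 ≤ e0 := by
          have := occ_m5 hoccP
          omega
        have hocct : patP <+: t.drop i := occ_of_take hoccP
        have hqk : ∀ q, q < i → ¬ patP <+: t.drop q := by
          intro q hq hpre
          have h5 := overlap hpre hoccC (by omega)
          exact hminP q (by omega) (occ_take hpre (by simpa [patP] using h5))
        rw [if_neg hi, specRec_shift t i (by omega) hqk]
        have h0 : PySem.Chars.find (t.drop i) patP = ((0 : Nat) : Int) := by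
          apply find_eval
          · simpa using hocct
          · omega
        have hE : PySem.Chars.findFrom (t.drop i) patC ((0 : Nat) : Int) none
            = ((e0 - i : Nat) : Int) := by
          apply findFrom_eval
          · simp only [List.length_drop]; omega
          · omega
          · rw [List.drop_drop, show i + (e0 - i) = e0 by omega]; exact hoccC
          · intro j _ hj hpre
            rw [List.drop_drop] at hpre
            exact hminC (i + j) (by omega) hpre
        rw [specRec_step h0 hE]
        rw [List.drop_drop, List.drop_drop]
        rw [show i + (0 + 5) = i + 5 by omega,
            show i + (e0 - i + 6) = e0 + 6 by omega,
            show e0 - i - (0 + 5) = e0 - (i + 5) by omega]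
        rw [hPi, show ((i : Int)) = ((i : Nat) : Int) from rfl, PySem.List.slice_to_natCast,
            show ((i : Int) + 5) = ((i + 5 : Nat) : Int) by push_cast; ring,
            PySem.List.slice_from_natCast]
        rw [List.take_take, show min i e0 = i by omega]
        rw [List.drop_take, show e0 - (i + 5) = e0 - (i + 5) from rfl]
        simp [List.append_assoc]
lemma pre_eq_alt (body : String) : pre body = pre_alt body := by
  unfold pre pre_alt
  rw [splitOn_eq_sop, altGo_sop body.toList.length body.toList le_rfl]
  rw [preCore_eq (body.toList.length - 0) body.toList [] 0 rfl (by omega)]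
  simp

-- ===== VERDICT (by name: the statement is the Claim_ definition above) =====
theorem pre_spec : Claim_equal_pre := by
  intro body _
  unfold Spec_pre
  exact pre_eq_alt body
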